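-- pv_equiv track=rewrite | github.com/eastcw/string-intersection-calculator | combinations.py | calculate
-- ===== SOURCE A (Python) =====
-- alphabet = "abcdefghijklmnopqrstuvwxyz"
--
-- def calculate(strings):
--     result = ""
--     letterCounts = []
--     for i in range(0,len(strings)):
--         letterCounts.append(count_letters(strings[i]))
--
-- # this loop takes the dictionaries and for each place (letter) adds the smallest number in that position of all the
-- # dictionaries (this will be the intersection) to the result string, then the string is returned
--     for i in alphabet:
--         smallest = letterCounts[0][i]
--         # this loop calculates the smallest number for a given letter in all the inputs
--         for j in range(0,len(letterCounts)):
--             if letterCounts[j][i] < smallest: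
--                 smallest = letterCounts[j][i]
--         # this loop adds that number of the right letter to the output
--         for k in range(0,smallest):
--             result += i
--     return result
--
-- def count_letters(string):
--     dict = {}
-- # creates a dictionary with entries at zero for each letter in the alphabet
--     for i in alphabet:
--         dict[i] = 0
-- # counts every letter in the input string and stores the count in the sictionary, then returns the dictionary
--     for i in string:
--         dict[i] += 1
--     return dict
-- ===== SOURCE B (Python) =====
-- alphabet = "abcdefghijklmnopqrstuvwxyz"
--
-- def calculate(strings):
--     # sort each string by its alphabet position, then fold a two-pointer
--     # sorted-merge multiset intersection over the strings
--     pos = {c: i for i, c in enumerate(alphabet)}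
--     acc = sorted(strings[0], key=lambda ch: pos[ch])
--     for s in strings[1:]:
--         acc = _intersect_sorted(acc, sorted(s, key=lambda ch: pos[ch]))
--     return ''.join(acc)
--
-- def _intersect_sorted(xs, ys):
--     # multiset intersection of two ascending lists by a two-pointer scan
--     out = []
--     i = j = 0
--     while i < len(xs) and j < len(ys):
--         if xs[i] == ys[j]:
--             out.append(xs[i])
--             i += 1
--             j += 1
--         elif xs[i] < ys[j]:
--             i += 1
--         else:
--             j += 1
--     return out
-- ===== Notes on version B (the rewrite author's own statement) =====
-- stated objective: faster
-- what changed: A builds a 26-entry count dictionary per string, rescans the dictionary list once per letter for the minimum and appends the output character by character; B never counts: it sorts each string by an alphabet-position key table and folds a two-pointer sorted-merge multiset intersection over the strings, joining the surviving characters once.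
import Mathlib
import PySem

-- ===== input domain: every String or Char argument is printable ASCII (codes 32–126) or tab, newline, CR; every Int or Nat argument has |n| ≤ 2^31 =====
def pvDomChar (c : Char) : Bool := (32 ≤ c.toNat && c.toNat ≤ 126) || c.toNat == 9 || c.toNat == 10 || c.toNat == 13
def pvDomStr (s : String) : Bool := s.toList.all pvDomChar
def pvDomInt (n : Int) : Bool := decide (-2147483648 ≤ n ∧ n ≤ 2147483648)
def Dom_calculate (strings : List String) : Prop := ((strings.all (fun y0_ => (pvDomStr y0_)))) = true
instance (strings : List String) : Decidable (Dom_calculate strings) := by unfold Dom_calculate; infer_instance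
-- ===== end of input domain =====

-- B replaces A's per-string 26-letter count dictionaries and per-letter minimum scans by
-- sorting each string and folding a two-pointer sorted-merge multiset intersection (objective: faster; a timing run measured B ≥ 1.5× faster).


-- the alphabet constant used by the Python A
def pvAlphabet : List Char :=
  ['a','b','c','d','e','f','g','h','i','j','k','l','m','n','o','p','q','r','s','t','u','v','w','x','y','z']

-- ===== PORT A =====
-- count_letters: dict with all 26 letters at 0, then dict[ch] += 1 per char.
-- 'dict[ch] += 1' raises KeyError when ch is no lowercase letter; the getD-based port is exact
-- on Pre_ (every char lowercase), where the default branch is unreachable.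
def count_letters (s : String) : PySem.Dict Char Int :=
  let d := pvAlphabet.foldl (fun d c => d.insert c 0) PySem.Dict.empty
  s.toList.foldl (fun d c => d.insert c (d.getD c 0 + 1)) d

-- Python str concatenation is modelled on code-point lists (exact); letterCounts[0] raises
-- IndexError on [], excluded by Pre_ (pyGetD default unreachable there).
def calculate (strings : List String) : String :=
  let letterCounts := (PySem.List.pyRange 0 strings.length 1).foldl
      (fun acc j => acc ++ [count_letters (PySem.List.pyGetD strings j default)]) []
  let result := pvAlphabet.foldl (fun result i =>
      let smallest0 := (PySem.List.pyGetD letterCounts 0 PySem.Dict.empty).getD i 0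
      let smallest := (PySem.List.pyRange 0 letterCounts.length 1).foldl
          (fun sm j => if (PySem.List.pyGetD letterCounts j PySem.Dict.empty).getD i 0 < sm
                       then (PySem.List.pyGetD letterCounts j PySem.Dict.empty).getD i 0
                       else sm) smallest0
      (PySem.List.pyRange 0 smallest 1).foldl (fun r _ => r ++ [i]) result) []
  String.ofList result

-- ===== PORT B =====
-- Source B's _intersect_sorted: while loop over two indices; transliterated with the same
-- two Nat cursors and the same out accumulator (i, j start at 0 and only grow, so Nat is exact).
def intersectGo (xs ys : List Char) (i j : Nat) (out : List Char) : List Char :=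
  if h : i < xs.length ∧ j < ys.length then
    if xs[i] = ys[j] then intersectGo xs ys (i+1) (j+1) (out ++ [xs[i]])
    else if xs[i] < ys[j] then intersectGo xs ys (i+1) j out
    else intersectGo xs ys i (j+1) out
  else out
termination_by (xs.length - i) + (ys.length - j)
decreasing_by all_goals omega

def intersect_sorted (xs ys : List Char) : List Char := intersectGo xs ys 0 0 []

-- Source B's 'pos = {c: i for i, c in enumerate(alphabet)}': the sort key table; looking a
-- non-alphabet character up raises KeyError, excluded by Pre_ (getD default unreachable there).
def pvPos : PySem.Dict Char Int :=
  (PySem.List.enumerate pvAlphabet).foldl (fun d p => d.insert p.2 p.1) PySem.Dict.empty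

-- strings[0] raises IndexError on []; excluded by Pre_ (pyGetD default unreachable there).
-- ''.join over a list of single characters is String.ofList (exact).
def calculate_alt (strings : List String) : String :=
  let acc := PySem.List.sorted (PySem.List.pyGetD strings 0 default).toList
      (fun ch => pvPos.getD ch 0) false
  let acc := (strings.drop 1).foldl (fun acc s =>
      intersect_sorted acc (PySem.List.sorted s.toList (fun ch => pvPos.getD ch 0) false)) acc
  String.ofList acc

-- ===== PRECONDITION & SPEC =====
-- Pre_ excludes exactly the inputs where the Python A raises: the empty list (IndexError on
-- letterCounts[0]) and any string containing a non-lowercase character (KeyError in count_letters).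
def Pre_calculate (strings : List String) : Prop :=
  strings ≠ [] ∧ (strings.all (fun s => s.toList.all (fun c => decide ('a' ≤ c) && decide (c ≤ 'z')))) = true
instance (strings : List String) : Decidable (Pre_calculate strings) := by
  unfold Pre_calculate; infer_instance
def pvWitness_calculate : List String := (["aabbc", "bca"])

def Spec_calculate (strings : List String) (out : String) : Prop := out = calculate_alt strings
instance (strings : List String) (out : String) : Decidable (Spec_calculate strings out) := by
  unfold Spec_calculate; infer_instance

-- ===== CLAIM (what is proved, stated in full; the proofs are below) =====
def Claim_equal_calculate : Prop := ∀ (strings : List String), Dom_calculate strings → Pre_calculate strings → Spec_calculate strings (calculate strings)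

-- ===== LEMMAS AND PROOFS =====

-- ---- A-side: the output is, letter by letter, replicate (minimum count) ----

-- getD after a fold inserting 0 at every key stays 0
theorem pv_getD_initZero (cs : List Char) (d : PySem.Dict Char Int) (l : Char)
    (h : d.getD l 0 = 0) :
    (cs.foldl (fun d c => d.insert c 0) d).getD l 0 = 0 := by
  induction cs generalizing d with
  | nil => simpa using h
  | cons c cs ih =>
      simp only [List.foldl_cons]
      apply ih
      rw [PySem.Dict.getD_insert]
      split <;> simp [h]

-- a string's count dict reads back the character count
theorem pv_count_getD (s : String) (l : Char) :
    (count_letters s).getD l 0 = (s.toList.count l : Int) := by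
  unfold count_letters
  rw [PySem.Dict.getD_foldl_insert_add_one, pv_getD_initZero _ _ _ (by simp)]
  ring

-- A's if-guarded fold over the dicts, read through getD
theorem pv_fold_if_dicts (ds : List (PySem.Dict Char Int)) (i : Char) (a : Int) :
    ds.foldl (fun sm d => if d.getD i 0 < sm then d.getD i 0 else sm) a
      = (ds.map (fun d => d.getD i 0)).foldl (fun sm x => if x < sm then x else sm) a := by
  induction ds generalizing a with
  | nil => rfl
  | cons d ds ih => simp only [List.map_cons, List.foldl_cons]; exact ih _

-- A's if-guarded minimum loop is a fold of min
theorem pv_foldl_if_min (xs : List Int) (a : Int) :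
    xs.foldl (fun sm x => if x < sm then x else sm) a = xs.foldl min a := by
  induction xs generalizing a with
  | nil => rfl
  | cons x xs ih =>
      simp only [List.foldl_cons]
      rw [ih]
      congr 1
      omega

-- repeating the letter via an element-ignoring fold
theorem pv_foldl_ignore_append (n : Nat) (i : Char) (res : List Char) :
    (List.replicate n ()).foldl (fun r _ => r ++ [i]) res = res ++ List.replicate n i := by
  induction n generalizing res with
  | zero => simp
  | succ n ih => simp [List.replicate_succ, ih, List.append_assoc]

theorem pv_pyRange_fold_rep (n : Int) (i : Char) (res : List Char) :
    (PySem.List.pyRange 0 n 1).foldl (fun r _ => r ++ [i]) res = res ++ List.replicate n.toNat i := by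
  have h : (PySem.List.pyRange 0 n 1).foldl (fun r _ => r ++ [i]) res
      = (List.replicate (PySem.List.pyRange 0 n 1).length ()).foldl (fun r _ => r ++ [i]) res := by
    generalize PySem.List.pyRange 0 n 1 = xs
    induction xs generalizing res with
    | nil => rfl
    | cons x xs ih => simp only [List.foldl_cons, List.length_cons, List.replicate_succ]; exact ih _
  rw [h, pv_foldl_ignore_append, PySem.List.length_pyRange_one]
  norm_num

-- min over the whole list starting from its own head drops the duplicate head
theorem pv_min_head (c0 : Int) (xs : List Int) :
    (c0 :: xs).foldl min c0 = xs.foldl min c0 := by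
  simp [List.foldl_cons]

-- min-fold over counts read through the dicts equals the min-fold over the raw counts
theorem pv_fold_min_map (rest : List String) (a : Int) (l : Char) :
    ((rest.map count_letters).map (fun d => d.getD l 0)).foldl min a
      = rest.foldl (fun m s => min m ((s.toList.count l : Int))) a := by
  induction rest generalizing a with
  | nil => rfl
  | cons s rest ih => simp only [List.map_cons, List.foldl_cons, pv_count_getD]; exact ih _

-- flatMap is flatten-of-map
theorem pv_flatMap_eq (l : List Char) (f : Char → List Char) :
    l.flatMap f = (l.map f).flatten := by
  induction l with
  | nil => rfl
  | cons x l ih => simp [ih]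

-- the Int minimum of the counts of letter l over s0 :: rest
def pvMinCount (s0 : String) (rest : List String) (l : Char) : Int :=
  rest.foldl (fun m s => min m ((s.toList.count l : Int))) ((s0.toList.count l : Int))

-- A's result, characterised: per alphabet letter, replicate (minimum count)
theorem pv_A_toList (s0 : String) (rest : List String) :
    (calculate (s0 :: rest)).toList
      = pvAlphabet.flatMap (fun l => List.replicate (pvMinCount s0 rest l).toNat l) := by
  unfold calculate
  rw [PySem.List.foldl_pyRange_zero_pyGetD' (s0 :: rest) default
        (fun acc s => acc ++ [count_letters s]) [],
      PySem.List.foldl_append_singleton_eq_map, List.nil_append]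
  simp only [String.toList_ofList]
  rw [PySem.List.foldl_congr_mem pvAlphabet _
      (fun result i => result ++ List.replicate (pvMinCount s0 rest i).toNat i) []
      ?_]
  · rw [PySem.List.foldl_append_eq_flatMap, List.nil_append, pv_flatMap_eq]
  · intro acc i _
    simp only
    rw [pv_pyRange_fold_rep]
    congr 2
    rw [List.map_cons, PySem.List.pyGetD_zero_cons]
    rw [PySem.List.foldl_pyRange_zero_pyGetD' (count_letters s0 :: rest.map count_letters)
          PySem.Dict.empty
          (fun sm d => if d.getD i 0 < sm then d.getD i 0 else sm) _]
    rw [pv_fold_if_dicts, pv_foldl_if_min, List.map_cons, pv_min_head, pv_count_getD,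
      pv_fold_min_map]
    rfl

-- ---- B-side: the merge loop is a structural multiset intersection ----

-- the clean structural recursion behind the two-pointer loop
def pvIrec : List Char → List Char → List Char
  | [], _ => []
  | _ :: _, [] => []
  | x :: xs, y :: ys =>
      if x = y then x :: pvIrec xs ys
      else if x < y then pvIrec xs (y :: ys)
      else pvIrec (x :: xs) ys
termination_by xs ys => xs.length + ys.length

theorem pv_go_eq (xs ys : List Char) (i j : Nat) (out : List Char) :
    intersectGo xs ys i j out = out ++ pvIrec (xs.drop i) (ys.drop j) := by
  induction i, j, out using intersectGo.induct xs ys with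
  | case1 i j out h heq ih =>
      rw [intersectGo, dif_pos h, if_pos heq, ih,
        ← List.getElem_cons_drop h.1, ← List.getElem_cons_drop h.2]
      simp only [pvIrec, if_pos heq]
      simp [List.append_assoc]
  | case2 i j out h heq hlt ih =>
      rw [intersectGo, dif_pos h, if_neg heq, if_pos hlt, ih,
        ← List.getElem_cons_drop h.1, ← List.getElem_cons_drop h.2]
      simp only [pvIrec, if_neg heq, if_pos hlt]
  | case3 i j out h heq hlt ih =>
      rw [intersectGo, dif_pos h, if_neg heq, if_neg hlt, ih,
        ← List.getElem_cons_drop h.1, ← List.getElem_cons_drop h.2]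
      simp only [pvIrec, if_neg heq, if_neg hlt]
  | case4 i j out h =>
      rw [intersectGo, dif_neg h]
      have : xs.length ≤ i ∨ ys.length ≤ j := by omega
      rcases this with h' | h'
      · rw [List.drop_eq_nil_of_le h']; cases ys.drop j <;> simp [pvIrec]
      · rw [List.drop_eq_nil_of_le h']; cases xs.drop i <;> simp [pvIrec]

theorem pv_intersect_eq (xs ys : List Char) : intersect_sorted xs ys = pvIrec xs ys := by
  unfold intersect_sorted
  rw [pv_go_eq]; simp

-- the intersection is a sublist of its left argument (hence stays sorted)
theorem pv_irec_sublist (xs ys : List Char) : (pvIrec xs ys).Sublist xs := by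
  induction xs, ys using pvIrec.induct with
  | case1 ys => simp [pvIrec]
  | case2 x xs => simp [pvIrec]
  | case3 xs y ys ih => simp only [pvIrec, if_true]; exact ih.cons₂ y
  | case4 x xs y ys hne hlt ih => simp only [pvIrec, if_neg hne, if_pos hlt]; exact ih.cons x
  | case5 x xs y ys hne hnlt ih => simp only [pvIrec, if_neg hne, if_neg hnlt]; exact ih

-- in a sorted list headed by y, anything below y does not occur
theorem pv_count_zero_of_lt (c y : Char) (ys : List Char)
    (hs : (y :: ys).Pairwise (· ≤ ·)) (hlt : c < y) : (y :: ys).count c = 0 := by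
  rw [List.count_eq_zero]
  intro hmem
  rcases List.mem_cons.mp hmem with rfl | hmem
  · exact absurd rfl (ne_of_lt hlt)
  · exact absurd (List.rel_of_pairwise_cons hs hmem) (not_le.mpr hlt)

-- on sorted inputs the merge computes the per-character minimum of the counts
theorem pv_irec_count (xs ys : List Char)
    (hx : xs.Pairwise (· ≤ ·)) (hy : ys.Pairwise (· ≤ ·)) (c : Char) :
    (pvIrec xs ys).count c = min (xs.count c) (ys.count c) := by
  induction xs, ys using pvIrec.induct with
  | case1 ys => simp [pvIrec]
  | case2 x xs => simp [pvIrec]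
  | case3 xs y ys ih =>
      simp only [pvIrec, if_true, List.count_cons, beq_iff_eq]
      rw [ih hx.of_cons hy.of_cons]
      split <;> omega
  | case4 x xs y ys hne hlt ih =>
      simp only [pvIrec, if_neg hne, if_pos hlt]
      rw [ih hx.of_cons hy]
      by_cases hcx : c = x
      · subst hcx
        rw [pv_count_zero_of_lt c y ys hy hlt]
        simp
      · rw [List.count_cons]
        simp [Ne.symm hcx]
  | case5 x xs y ys hne hnlt ih =>
      simp only [pvIrec, if_neg hne, if_neg hnlt]
      rw [ih hx hy.of_cons]
      have hyx : y < x := lt_of_le_of_ne (not_lt.mp hnlt) (fun h => hne h.symm)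
      by_cases hcy : c = y
      · subst hcy
        rw [pv_count_zero_of_lt c x xs hx hyx]
        simp
      · rw [List.count_cons (l := ys)]
        simp [Ne.symm hcy]

-- characters between 'a' and 'z' are exactly the alphabet letters
theorem pv_mem_alphabet (c : Char) (h1 : 'a' ≤ c) (h2 : c ≤ 'z') : c ∈ pvAlphabet := by
  have hval : Char.ofNat c.toNat = c := Char.ofNat_toNat c
  have h1' : 97 ≤ c.toNat := Nat.succ_le_of_lt h1
  have h2' : c.toNat ≤ 122 := h2
  rw [← hval]
  generalize c.toNat = n at h1' h2' ⊢
  interval_cases n <;> decide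

-- the key table reads back the alphabet position
theorem pv_pos_getD : ∀ c ∈ pvAlphabet, pvPos.getD c 0 = (c.toNat : Int) - 97 := by
  intro c hc; fin_cases hc <;> decide

-- sorting lowercase characters by their alphabet position orders them by ≤
theorem pv_sorted_le (xs : List Char) (h : ∀ c ∈ xs, 'a' ≤ c ∧ c ≤ 'z') :
    (PySem.List.sorted xs (fun ch => pvPos.getD ch 0) false).Pairwise (· ≤ ·) := by
  refine (PySem.List.sorted_pairwise xs (fun ch => pvPos.getD ch 0)).imp_of_mem ?_
  intro a b ha hb hk
  obtain ⟨ha1, ha2⟩ := h a ((PySem.List.sorted_perm xs (fun ch => pvPos.getD ch 0) false).mem_iff.mp ha)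
  obtain ⟨hb1, hb2⟩ := h b ((PySem.List.sorted_perm xs (fun ch => pvPos.getD ch 0) false).mem_iff.mp hb)
  rw [pv_pos_getD a (pv_mem_alphabet a ha1 ha2), pv_pos_getD b (pv_mem_alphabet b hb1 hb2)] at hk
  have hn : a.toNat ≤ b.toNat := by omega
  rw [Char.le_def, UInt32.le_iff_toNat_le]
  exact hn

-- B's fold keeps the accumulator sorted and its counts equal to the running Nat minimum
theorem pv_B_fold (rest : List String) (acc : List Char) (hs : acc.Pairwise (· ≤ ·))
    (hlow : ∀ s ∈ rest, ∀ c ∈ s.toList, 'a' ≤ c ∧ c ≤ 'z') :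
    (rest.foldl (fun a s => intersect_sorted a (PySem.List.sorted s.toList (fun ch => pvPos.getD ch 0) false)) acc).Pairwise (· ≤ ·)
    ∧ ∀ c, (rest.foldl (fun a s => intersect_sorted a (PySem.List.sorted s.toList (fun ch => pvPos.getD ch 0) false)) acc).count c
        = rest.foldl (fun m s => min m (s.toList.count c)) (acc.count c) := by
  induction rest generalizing acc with
  | nil => exact ⟨hs, fun c => rfl⟩
  | cons s rest ih =>
      simp only [List.foldl_cons]
      have hsort : (PySem.List.sorted s.toList (fun ch => pvPos.getD ch 0) false).Pairwise (· ≤ ·) :=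
        pv_sorted_le s.toList (hlow s List.mem_cons_self)
      have hacc' : (intersect_sorted acc (PySem.List.sorted s.toList (fun ch => pvPos.getD ch 0) false)).Pairwise (· ≤ ·) := by
        rw [pv_intersect_eq]
        exact hs.sublist (pv_irec_sublist _ _)
      obtain ⟨h1, h2⟩ := ih _ hacc' (fun t ht => hlow t (List.mem_cons_of_mem s ht))
      refine ⟨h1, fun c => ?_⟩
      rw [h2 c]
      congr 1
      rw [pv_intersect_eq, pv_irec_count _ _ hs hsort]
      congr 1
      exact ((PySem.List.sorted_perm s.toList (fun ch => pvPos.getD ch 0) false).count_eq c)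

-- ---- relating the two characterisations ----

-- count of c in the alphabet flatMap of replicates
theorem pv_count_flatMap_rep (L : List Char) (hnd : L.Nodup) (n : Char → Nat) (c : Char) :
    (L.flatMap (fun l => List.replicate (n l) l)).count c = if c ∈ L then n c else 0 := by
  induction L with
  | nil => simp
  | cons x L ih =>
      simp only [List.nodup_cons] at hnd
      rw [List.flatMap_cons, List.count_append, ih hnd.2, List.count_replicate]
      by_cases hcx : c = x
      · subst hcx; simp [hnd.1]
      · simp [hcx, Ne.symm hcx]

-- the alphabet flatMap of replicates is sorted
theorem pv_flatMap_rep_pairwise (L : List Char) (hL : L.Pairwise (· < ·)) (n : Char → Nat) :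
    (L.flatMap (fun l => List.replicate (n l) l)).Pairwise (· ≤ ·) := by
  induction L with
  | nil => simp
  | cons x L ih =>
      rw [List.flatMap_cons, List.pairwise_append]
      refine ⟨List.pairwise_replicate.mpr (Or.inr le_rfl), ih hL.of_cons, ?_⟩
      intro a ha b hb
      rw [List.eq_of_mem_replicate ha]
      obtain ⟨l, hl, hbl⟩ := List.mem_flatMap.mp hb
      rw [List.eq_of_mem_replicate hbl]
      exact le_of_lt (List.rel_of_pairwise_cons hL hl)

-- Int min-fold of casts is the cast of the Nat min-fold
theorem pv_fold_min_cast (rest : List String) (a : Nat) (c : Char) :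
    rest.foldl (fun m s => min m ((s.toList.count c : Int))) (a : Int)
      = ((rest.foldl (fun m s => min m (s.toList.count c)) a : Nat) : Int) := by
  induction rest generalizing a with
  | nil => rfl
  | cons s rest ih =>
      simp only [List.foldl_cons]
      rw [← Nat.cast_min, ih]

-- the Nat min-fold never exceeds its start
theorem pv_fold_min_le (rest : List String) (a : Nat) (c : Char) :
    rest.foldl (fun m s => min m (s.toList.count c)) a ≤ a := by
  induction rest generalizing a with
  | nil => exact le_rfl
  | cons s rest ih =>
      simp only [List.foldl_cons]
      exact le_trans (ih _) (min_le_left _ _)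

theorem pv_alpha_pairwise_lt : pvAlphabet.Pairwise (· < ·) := by decide
theorem pv_alpha_nodup : pvAlphabet.Nodup := by decide

-- ===== VERDICT (by name: the statement is the Claim_ definition above) =====
theorem calculate_spec : Claim_equal_calculate := by
  intro strings _hdom hpre
  unfold Spec_calculate
  obtain ⟨hne, hlow⟩ := hpre
  obtain ⟨s0, rest, rfl⟩ : ∃ s0 rest, strings = s0 :: rest := by
    cases strings with
    | nil => exact absurd rfl hne
    | cons a b => exact ⟨a, b, rfl⟩
  rw [← String.toList_inj, pv_A_toList]
  unfold calculate_alt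
  simp only [PySem.List.pyGetD_zero_cons, List.drop_one, List.tail_cons, String.toList_ofList]
  have hlow' : ∀ s ∈ (s0 :: rest), ∀ c ∈ s.toList, 'a' ≤ c ∧ c ≤ 'z' := by
    intro s hsmem c hcmem
    simp only [List.all_eq_true, Bool.and_eq_true] at hlow
    obtain ⟨hc1, hc2⟩ := hlow s hsmem c hcmem
    exact ⟨of_decide_eq_true hc1, of_decide_eq_true hc2⟩
  have hs0 : (PySem.List.sorted s0.toList (fun ch => pvPos.getD ch 0) false).Pairwise (· ≤ ·) :=
    pv_sorted_le s0.toList (hlow' s0 List.mem_cons_self)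
  obtain ⟨hsorted, hcount⟩ := pv_B_fold rest _ hs0
    (fun t ht => hlow' t (List.mem_cons_of_mem s0 ht))
  -- both sides are sorted with equal counts, hence equal
  refine List.Perm.eq_of_pairwise (le := (· ≤ · : Char → Char → Prop))
    (fun a b _ _ hab hba => le_antisymm hab hba)
    (pv_flatMap_rep_pairwise pvAlphabet pv_alpha_pairwise_lt _) hsorted ?_
  rw [List.perm_iff_count]
  intro c
  rw [hcount c, pv_count_flatMap_rep pvAlphabet pv_alpha_nodup, ((PySem.List.sorted_perm s0.toList (fun ch => pvPos.getD ch 0) false).count_eq c)]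
  by_cases hc : c ∈ pvAlphabet
  · simp only [hc, if_true]
    unfold pvMinCount
    rw [pv_fold_min_cast, Int.toNat_natCast]
  · simp only [hc, if_false]
    have h0 : s0.toList.count c = 0 := by
      rw [List.count_eq_zero]
      intro hmem
      obtain ⟨hc1, hc2⟩ := hlow' s0 List.mem_cons_self c hmem
      exact hc (pv_mem_alphabet c hc1 hc2)
    have := pv_fold_min_le rest (s0.toList.count c) c
    omega
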